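-- pv_equiv track=rewrite | github.com/amaancoderx/Genome-AI | brand_ai_assistant.py | _parse_instagram_posts
-- ===== SOURCE A (Python) =====
-- from typing import Dict, List, Optional
--
-- def _parse_instagram_posts(ai_response: str) -> List[Dict]:
--     """Parse AI response into structured post objects."""
--     posts = []
--     lines = ai_response.split('\n')
--
--     current_post = {}
--     for line in lines:
--         line = line.strip()
--         if line.startswith('Post ') or line.startswith('**Post'):
--             if current_post:
--                 posts.append(current_post)
--             current_post = {}
--         elif 'caption:' in line.lower():
--             current_post['caption'] = line.split(':', 1)[1].strip()
--         elif 'hashtag' in line.lower():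
--             current_post['hashtags'] = line.split(':', 1)[1].strip()
--         elif 'time' in line.lower() or 'posting' in line.lower():
--             current_post['best_time'] = line.split(':', 1)[1].strip()
--         elif 'type' in line.lower():
--             current_post['content_type'] = line.split(':', 1)[1].strip()
--
--     if current_post:
--         posts.append(current_post)
--
--     return posts if posts else [{"caption": ai_response, "hashtags": "", "best_time": "Peak hours", "content_type": "Static"}]
-- ===== SOURCE B (Python) =====
-- from typing import Dict, List, Optional
--
--
-- def _is_marker(s: str) -> bool:
--     return s.startswith('Post ') or s.startswith('**Post')
--
--
-- def _key_for(low: str) -> Optional[str]: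
--     if 'caption:' in low:
--         return 'caption'
--     if 'hashtag' in low:
--         return 'hashtags'
--     if 'time' in low or 'posting' in low:
--         return 'best_time'
--     if 'type' in low:
--         return 'content_type'
--     return None
--
--
-- def _split_blocks(lines: List[str]) -> List[List[str]]:
--     """Cut the line list at every marker line; leading lines form their own block."""
--     blocks = []
--     rest = lines
--     while True:
--         pre = []
--         for s in rest:
--             if _is_marker(s):
--                 break
--             pre.append(s)
--         blocks.append(pre)
--         if len(pre) == len(rest):
--             return blocks
--         rest = rest[len(pre) + 1:]
--
--
-- def _block_to_post(block: List[str]) -> Dict: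
--     post = {}
--     for s in block:
--         key = _key_for(s.lower())
--         if key is not None:
--             post[key] = s.split(':', 1)[1].strip()
--     return post
--
--
-- def _parse_instagram_posts(ai_response: str) -> List[Dict]:
--     stripped = [l.strip() for l in ai_response.split('\n')]
--     posts = [p for p in (_block_to_post(b) for b in _split_blocks(stripped)) if p]
--     return posts if posts else [{"caption": ai_response, "hashtags": "", "best_time": "Peak hours", "content_type": "Static"}]
-- ===== Notes on version B (the rewrite author's own statement) =====
-- stated objective: alternative
-- what changed: Replaces A's single stateful scan (flush-current-dict-on-marker accumulator loop) by a two-pass decomposition: first partition the stripped lines into post-blocks at the 'Post '/'**Post' marker lines, then map each block to a dict with a key-classifier helper and keep the non-empty dicts.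
import Mathlib
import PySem

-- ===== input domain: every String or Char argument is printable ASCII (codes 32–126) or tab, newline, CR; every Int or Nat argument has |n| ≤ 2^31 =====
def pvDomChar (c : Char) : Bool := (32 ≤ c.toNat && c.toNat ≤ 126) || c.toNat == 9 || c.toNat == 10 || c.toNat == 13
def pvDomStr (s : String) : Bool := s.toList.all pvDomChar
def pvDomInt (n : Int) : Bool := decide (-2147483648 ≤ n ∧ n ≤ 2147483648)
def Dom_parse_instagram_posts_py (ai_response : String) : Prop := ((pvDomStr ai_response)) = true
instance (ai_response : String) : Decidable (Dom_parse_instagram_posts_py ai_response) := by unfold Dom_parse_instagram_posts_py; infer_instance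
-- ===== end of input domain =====

-- B re-implements the parser as: partition lines into post-blocks, map each block to a dict, filter
-- the non-empty dicts (objective: alternative decomposition, same cost; return value only).

-- line.split(':', 1)[1].strip() — the expression both Pythons contain verbatim.
-- pyGet? is none exactly when the line has no ':' (Python raises IndexError there; excluded by Pre_,
-- the .getD "" branches are unreachable under Pre_); split? is some since the separator ":" ≠ "".
def pvSplitVal (l : String) : String :=
  PySem.Str.strip ((PySem.List.pyGet? ((PySem.Str.splitMax? l ":" 1).getD []) 1).getD "")

-- ===== PORT A =====
def pvStepA (st : List (PySem.Dict String String) × PySem.Dict String String) (raw : String) :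
    List (PySem.Dict String String) × PySem.Dict String String :=
  let line := PySem.Str.strip raw
  if PySem.Str.startswith line "Post " || PySem.Str.startswith line "**Post" then
    ((if st.2.items.isEmpty then st.1 else st.1 ++ [st.2]), PySem.Dict.mk [])
  else if PySem.Str.isIn "caption:" (PySem.Str.lower line) then
    (st.1, st.2.insert "caption" (pvSplitVal line))
  else if PySem.Str.isIn "hashtag" (PySem.Str.lower line) then
    (st.1, st.2.insert "hashtags" (pvSplitVal line))
  else if PySem.Str.isIn "time" (PySem.Str.lower line) || PySem.Str.isIn "posting" (PySem.Str.lower line) then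
    (st.1, st.2.insert "best_time" (pvSplitVal line))
  else if PySem.Str.isIn "type" (PySem.Str.lower line) then
    (st.1, st.2.insert "content_type" (pvSplitVal line))
  else st

def parse_instagram_posts_py (ai_response : String) : List (List (String × String)) :=
  let lines := (PySem.Str.split? ai_response "\n").getD []
  let st := lines.foldl pvStepA ([], PySem.Dict.mk [])
  let posts := if st.2.items.isEmpty then st.1 else st.1 ++ [st.2]
  if posts.isEmpty then
    [[("caption", ai_response), ("hashtags", ""), ("best_time", "Peak hours"), ("content_type", "Static")]]
  else posts.map PySem.Dict.items

-- ===== PORT B =====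
def pvIsMarker (s : String) : Bool :=
  PySem.Str.startswith s "Post " || PySem.Str.startswith s "**Post"

def pvKeyFor (low : String) : Option String :=
  if PySem.Str.isIn "caption:" low then some "caption"
  else if PySem.Str.isIn "hashtag" low then some "hashtags"
  else if PySem.Str.isIn "time" low || PySem.Str.isIn "posting" low then some "best_time"
  else if PySem.Str.isIn "type" low then some "content_type"
  else none

-- Source B's _split_blocks: repeatedly cut off the lines before the first marker, drop the marker.
def pvSplitBlocks (lines : List String) : List (List String) :=
  let pre := lines.takeWhile (fun s => !pvIsMarker s)
  let rest := lines.dropWhile (fun s => !pvIsMarker s)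
  if h : rest = [] then [pre]
  else pre :: pvSplitBlocks rest.tail
termination_by lines.length
decreasing_by
  have h1 : (lines.dropWhile (fun s => !pvIsMarker s)).length ≤ lines.length :=
    lines.length_dropWhile_le _
  have h3 : 0 < (lines.dropWhile (fun s => !pvIsMarker s)).length :=
    List.length_pos_of_ne_nil h
  simp only [List.length_tail]
  omega

def pvBlockToPost (block : List String) : PySem.Dict String String :=
  block.foldl
    (fun post s =>
      match pvKeyFor (PySem.Str.lower s) with
      | some k => post.insert k (pvSplitVal s)
      | none => post)
    (PySem.Dict.mk [])

def parse_instagram_posts_py_alt (ai_response : String) : List (List (String × String)) :=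
  let stripped := ((PySem.Str.split? ai_response "\n").getD []).map PySem.Str.strip
  let posts := ((pvSplitBlocks stripped).map pvBlockToPost).filter (fun p => !p.items.isEmpty)
  if posts.isEmpty then
    [[("caption", ai_response), ("hashtags", ""), ("best_time", "Peak hours"), ("content_type", "Static")]]
  else posts.map PySem.Dict.items

-- ===== PRECONDITION & SPEC =====
-- Pre_ excludes exactly the inputs on which Python A raises IndexError: a line whose stripped form is
-- not a 'Post '/'**Post' marker, does not contain 'caption:', matches one of the hashtag/time/posting/type
-- keywords, and contains no ':' (split(':',1)[1] is out of range there; B raises identically).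
def Pre_parse_instagram_posts_py (ai_response : String) : Prop :=
  ∀ l ∈ (PySem.Str.split? ai_response "\n").getD [],
    PySem.Str.startswith (PySem.Str.strip l) "Post " = false →
    PySem.Str.startswith (PySem.Str.strip l) "**Post" = false →
    PySem.Str.isIn "caption:" (PySem.Str.lower (PySem.Str.strip l)) = false →
    (PySem.Str.isIn "hashtag" (PySem.Str.lower (PySem.Str.strip l)) ||
     PySem.Str.isIn "time" (PySem.Str.lower (PySem.Str.strip l)) ||
     PySem.Str.isIn "posting" (PySem.Str.lower (PySem.Str.strip l)) ||
     PySem.Str.isIn "type" (PySem.Str.lower (PySem.Str.strip l))) = true →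
    PySem.Str.isIn ":" (PySem.Str.strip l) = true
instance (ai_response : String) : Decidable (Pre_parse_instagram_posts_py ai_response) := by
  unfold Pre_parse_instagram_posts_py; infer_instance

def pvWitness_parse_instagram_posts_py : String := "Post 1\nCaption: hi\nHashtags: #a"

def Spec_parse_instagram_posts_py (ai_response : String) (out : List (List (String × String))) : Prop :=
  out = parse_instagram_posts_py_alt ai_response
instance (ai_response : String) (out : List (List (String × String))) : Decidable (Spec_parse_instagram_posts_py ai_response out) := by
  unfold Spec_parse_instagram_posts_py; infer_instance

-- ===== CLAIM (what is proved, stated in full; the proofs are below) =====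
def Claim_equal_parse_instagram_posts_py : Prop :=
  ∀ (ai_response : String), Dom_parse_instagram_posts_py ai_response →
    Pre_parse_instagram_posts_py ai_response →
    Spec_parse_instagram_posts_py ai_response (parse_instagram_posts_py ai_response)

-- ===== LEMMAS AND PROOFS =====

-- the body of pvBlockToPost's fold, as a named function for the proofs
def pvApply (post : PySem.Dict String String) (s : String) : PySem.Dict String String :=
  match pvKeyFor (PySem.Str.lower s) with
  | some k => post.insert k (pvSplitVal s)
  | none => post

-- result of A's loop tail: first block folded from seed `cur`, later blocks from the empty dict
def pvRun (cur : PySem.Dict String String) (bs : List (List String)) : List (PySem.Dict String String) :=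
  match bs with
  | [] => []
  | b :: rest => ((b.foldl pvApply cur) :: rest.map pvBlockToPost).filter (fun p => !p.items.isEmpty)

theorem pvBlockToPost_eq (b : List String) :
    pvBlockToPost b = b.foldl pvApply (PySem.Dict.mk []) := rfl

theorem pvApply_eq (post : PySem.Dict String String) (s : String) :
    pvApply post s =
      if PySem.Str.isIn "caption:" (PySem.Str.lower s) then post.insert "caption" (pvSplitVal s)
      else if PySem.Str.isIn "hashtag" (PySem.Str.lower s) then post.insert "hashtags" (pvSplitVal s)
      else if PySem.Str.isIn "time" (PySem.Str.lower s) || PySem.Str.isIn "posting" (PySem.Str.lower s) then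
        post.insert "best_time" (pvSplitVal s)
      else if PySem.Str.isIn "type" (PySem.Str.lower s) then post.insert "content_type" (pvSplitVal s)
      else post := by
  simp only [pvApply, pvKeyFor]
  split_ifs <;> rfl

theorem pvStepA_eq (st : List (PySem.Dict String String) × PySem.Dict String String) (raw : String) :
    pvStepA st raw =
      if pvIsMarker (PySem.Str.strip raw) then
        ((if st.2.items.isEmpty then st.1 else st.1 ++ [st.2]), PySem.Dict.mk [])
      else (st.1, pvApply st.2 (PySem.Str.strip raw)) := by
  simp only [pvStepA, pvIsMarker, pvApply_eq]
  split_ifs <;> rfl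

theorem pvSplitBlocks_nil : pvSplitBlocks [] = [[]] := by
  rw [pvSplitBlocks]; rfl

theorem pvSplitBlocks_cons_marker {s : String} (ss : List String) (h : pvIsMarker s = true) :
    pvSplitBlocks (s :: ss) = [] :: pvSplitBlocks ss := by
  rw [pvSplitBlocks]
  simp [h]

theorem pvSplitBlocks_shape (ls : List String) : ∃ b r, pvSplitBlocks ls = b :: r := by
  rw [pvSplitBlocks]
  by_cases h : ls.dropWhile (fun s => !pvIsMarker s) = [] <;> simp [h]

theorem pvSplitBlocks_cons_not_marker {s : String} {ss : List String} (h : pvIsMarker s = false)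
    {b : List String} {r : List (List String)} (hss : pvSplitBlocks ss = b :: r) :
    pvSplitBlocks (s :: ss) = (s :: b) :: r := by
  rw [pvSplitBlocks] at hss ⊢
  by_cases hd : ss.dropWhile (fun s => !pvIsMarker s) = [] <;>
    simp_all

theorem pvRun_empty_seed (bs : List (List String)) :
    pvRun (PySem.Dict.mk []) bs = (bs.map pvBlockToPost).filter (fun p => !p.items.isEmpty) := by
  cases bs with
  | nil => rfl
  | cons b rest => simp [pvRun, pvBlockToPost_eq]

theorem pvMain (lines : List String) (posts : List (PySem.Dict String String))
    (cur : PySem.Dict String String) :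
    (if ((lines.foldl pvStepA (posts, cur)).2).items.isEmpty
     then (lines.foldl pvStepA (posts, cur)).1
     else (lines.foldl pvStepA (posts, cur)).1 ++ [(lines.foldl pvStepA (posts, cur)).2]) =
      posts ++ pvRun cur (pvSplitBlocks (lines.map PySem.Str.strip)) := by
  induction lines generalizing posts cur with
  | nil =>
    simp only [List.foldl_nil, List.map_nil, pvSplitBlocks_nil, pvRun, List.foldl_nil,
      List.map_nil, List.filter]
    by_cases hc : cur.items.isEmpty <;> simp [hc]
  | cons raw tl ih =>
    simp only [List.foldl_cons, List.map_cons, pvStepA_eq]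
    by_cases hm : pvIsMarker (PySem.Str.strip raw)
    · rw [if_pos hm, pvSplitBlocks_cons_marker _ hm]
      have := ih (if cur.items.isEmpty then posts else posts ++ [cur]) (PySem.Dict.mk [])
      rw [this, pvRun_empty_seed]
      obtain ⟨b, r, hbr⟩ := pvSplitBlocks_shape (tl.map PySem.Str.strip)
      rw [hbr]
      simp only [pvRun, List.foldl_nil, List.map_cons, List.filter_cons, pvBlockToPost_eq]
      by_cases hc : cur.items.isEmpty <;> simp [hc]
    · rw [if_neg hm]
      obtain ⟨b, r, hbr⟩ := pvSplitBlocks_shape (tl.map PySem.Str.strip)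
      rw [pvSplitBlocks_cons_not_marker (by simpa using hm) hbr]
      have := ih posts (pvApply cur (PySem.Str.strip raw))
      rw [hbr] at this
      rw [this]
      simp [pvRun, List.foldl_cons]

-- ===== VERDICT (by name: the statement is the Claim_ definition above) =====
theorem parse_instagram_posts_py_spec : Claim_equal_parse_instagram_posts_py := by
  intro ai _ _
  unfold Spec_parse_instagram_posts_py parse_instagram_posts_py parse_instagram_posts_py_alt
  have h := pvMain ((PySem.Str.split? ai "\n").getD []) [] (PySem.Dict.mk [])
  simp only [List.nil_append, pvRun_empty_seed] at h
  simp only [h]
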